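/-
  GENERATED by tools/gen_fields.py from c/gif/gif_LAYOUT_STRUCTS.txt — do not edit; re-run the script when the image is rebuilt.
  THE FIELD VOCABULARY: for every struct S of the decoder and every field x — `Off.S.x` (the offset), `Off.sizeof.S`,
  `S.x mem p` (the typed, UNSIGNED read of a scalar or pointer field of the S at the address `p`), `S.x_at p i` (the address of
  element `i` of an array field, or of an embedded struct). Embedded structs are flattened (`GifFileType.Image.ColorMap`).
  `simp only [gfield]` unfolds all of them to `rd mem (p + k) n` with numerals (Gif/Spec/Mem.lean).
-/
import Gif.Spec.Mem
namespace Gif.Spec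
open X86 X86.User

/-! ### `GifColorType` (3 bytes) -/

/-- `sizeof(GifColorType)`. -/
@[gfield] def Off.sizeof.GifColorType : Nat := 3

/-- `GifColorType`: the offset of `Red` (`GifByteType`, 1 bytes). -/
@[gfield] def Off.GifColorType.Red : Nat := 0
/-- The `GifByteType` field `Red` of the `GifColorType` at the address `p`, as a number. -/
@[gfield] def GifColorType.Red (mem : Mem) (p : Nat) : Nat := rd mem p 1

/-- `GifColorType`: the offset of `Green` (`GifByteType`, 1 bytes). -/
@[gfield] def Off.GifColorType.Green : Nat := 1
/-- The `GifByteType` field `Green` of the `GifColorType` at the address `p`, as a number. -/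
@[gfield] def GifColorType.Green (mem : Mem) (p : Nat) : Nat := rd mem (p + 1) 1

/-- `GifColorType`: the offset of `Blue` (`GifByteType`, 1 bytes). -/
@[gfield] def Off.GifColorType.Blue : Nat := 2
/-- The `GifByteType` field `Blue` of the `GifColorType` at the address `p`, as a number. -/
@[gfield] def GifColorType.Blue (mem : Mem) (p : Nat) : Nat := rd mem (p + 2) 1

/-! ### `ColorMapObject` (24 bytes) -/

/-- `sizeof(ColorMapObject)`. -/
@[gfield] def Off.sizeof.ColorMapObject : Nat := 24

/-- `ColorMapObject`: the offset of `ColorCount` (`int`, 4 bytes). -/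
@[gfield] def Off.ColorMapObject.ColorCount : Nat := 0
/-- The `int` field `ColorCount` of the `ColorMapObject` at the address `p`, as a number. -/
@[gfield] def ColorMapObject.ColorCount (mem : Mem) (p : Nat) : Nat := rd mem p 4

/-- `ColorMapObject`: the offset of `BitsPerPixel` (`int`, 4 bytes). -/
@[gfield] def Off.ColorMapObject.BitsPerPixel : Nat := 4
/-- The `int` field `BitsPerPixel` of the `ColorMapObject` at the address `p`, as a number. -/
@[gfield] def ColorMapObject.BitsPerPixel (mem : Mem) (p : Nat) : Nat := rd mem (p + 4) 4

/-- `ColorMapObject`: the offset of `SortFlag` (`_Bool`, 1 bytes). -/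
@[gfield] def Off.ColorMapObject.SortFlag : Nat := 8
/-- The `_Bool` field `SortFlag` of the `ColorMapObject` at the address `p`, as a number. -/
@[gfield] def ColorMapObject.SortFlag (mem : Mem) (p : Nat) : Nat := rd mem (p + 8) 1

/-- `ColorMapObject`: the offset of `Colors` (`GifColorType *`, 8 bytes). -/
@[gfield] def Off.ColorMapObject.Colors : Nat := 16
/-- The `GifColorType *` field `Colors` of the `ColorMapObject` at the address `p`, as a number. -/
@[gfield] def ColorMapObject.Colors (mem : Mem) (p : Nat) : Nat := rd mem (p + 16) 8

/-! ### `GifImageDesc` (32 bytes) -/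

/-- `sizeof(GifImageDesc)`. -/
@[gfield] def Off.sizeof.GifImageDesc : Nat := 32

/-- `GifImageDesc`: the offset of `Left` (`GifWord`, 4 bytes). -/
@[gfield] def Off.GifImageDesc.Left : Nat := 0
/-- The `GifWord` field `Left` of the `GifImageDesc` at the address `p`, as a number. -/
@[gfield] def GifImageDesc.Left (mem : Mem) (p : Nat) : Nat := rd mem p 4

/-- `GifImageDesc`: the offset of `Top` (`GifWord`, 4 bytes). -/
@[gfield] def Off.GifImageDesc.Top : Nat := 4
/-- The `GifWord` field `Top` of the `GifImageDesc` at the address `p`, as a number. -/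
@[gfield] def GifImageDesc.Top (mem : Mem) (p : Nat) : Nat := rd mem (p + 4) 4

/-- `GifImageDesc`: the offset of `Width` (`GifWord`, 4 bytes). -/
@[gfield] def Off.GifImageDesc.Width : Nat := 8
/-- The `GifWord` field `Width` of the `GifImageDesc` at the address `p`, as a number. -/
@[gfield] def GifImageDesc.Width (mem : Mem) (p : Nat) : Nat := rd mem (p + 8) 4

/-- `GifImageDesc`: the offset of `Height` (`GifWord`, 4 bytes). -/
@[gfield] def Off.GifImageDesc.Height : Nat := 12
/-- The `GifWord` field `Height` of the `GifImageDesc` at the address `p`, as a number. -/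
@[gfield] def GifImageDesc.Height (mem : Mem) (p : Nat) : Nat := rd mem (p + 12) 4

/-- `GifImageDesc`: the offset of `Interlace` (`_Bool`, 1 bytes). -/
@[gfield] def Off.GifImageDesc.Interlace : Nat := 16
/-- The `_Bool` field `Interlace` of the `GifImageDesc` at the address `p`, as a number. -/
@[gfield] def GifImageDesc.Interlace (mem : Mem) (p : Nat) : Nat := rd mem (p + 16) 1

/-- `GifImageDesc`: the offset of `ColorMap` (`ColorMapObject *`, 8 bytes). -/
@[gfield] def Off.GifImageDesc.ColorMap : Nat := 24
/-- The `ColorMapObject *` field `ColorMap` of the `GifImageDesc` at the address `p`, as a number. -/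
@[gfield] def GifImageDesc.ColorMap (mem : Mem) (p : Nat) : Nat := rd mem (p + 24) 8

/-! ### `ExtensionBlock` (24 bytes) -/

/-- `sizeof(ExtensionBlock)`. -/
@[gfield] def Off.sizeof.ExtensionBlock : Nat := 24

/-- `ExtensionBlock`: the offset of `ByteCount` (`int`, 4 bytes). -/
@[gfield] def Off.ExtensionBlock.ByteCount : Nat := 0
/-- The `int` field `ByteCount` of the `ExtensionBlock` at the address `p`, as a number. -/
@[gfield] def ExtensionBlock.ByteCount (mem : Mem) (p : Nat) : Nat := rd mem p 4

/-- `ExtensionBlock`: the offset of `Bytes` (`GifByteType *`, 8 bytes). -/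
@[gfield] def Off.ExtensionBlock.Bytes : Nat := 8
/-- The `GifByteType *` field `Bytes` of the `ExtensionBlock` at the address `p`, as a number. -/
@[gfield] def ExtensionBlock.Bytes (mem : Mem) (p : Nat) : Nat := rd mem (p + 8) 8

/-- `ExtensionBlock`: the offset of `Function` (`int`, 4 bytes). -/
@[gfield] def Off.ExtensionBlock.Function : Nat := 16
/-- The `int` field `Function` of the `ExtensionBlock` at the address `p`, as a number. -/
@[gfield] def ExtensionBlock.Function (mem : Mem) (p : Nat) : Nat := rd mem (p + 16) 4

/-! ### `SavedImage` (56 bytes) -/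

/-- `sizeof(SavedImage)`. -/
@[gfield] def Off.sizeof.SavedImage : Nat := 56

/-- `SavedImage`: the offset of `ImageDesc` (`GifImageDesc`, 32 bytes). -/
@[gfield] def Off.SavedImage.ImageDesc : Nat := 0
/-- The address of the embedded `GifImageDesc` `ImageDesc` of the `SavedImage` at `p`. -/
@[gfield] def SavedImage.ImageDesc_at (p : Nat) : Nat := p

/-- `SavedImage`: the offset of `ImageDesc.Left` (`GifWord`, 4 bytes). -/
@[gfield] def Off.SavedImage.ImageDesc.Left : Nat := 0
/-- The `GifWord` field `ImageDesc.Left` of the `SavedImage` at the address `p`, as a number. -/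
@[gfield] def SavedImage.ImageDesc.Left (mem : Mem) (p : Nat) : Nat := rd mem p 4

/-- `SavedImage`: the offset of `ImageDesc.Top` (`GifWord`, 4 bytes). -/
@[gfield] def Off.SavedImage.ImageDesc.Top : Nat := 4
/-- The `GifWord` field `ImageDesc.Top` of the `SavedImage` at the address `p`, as a number. -/
@[gfield] def SavedImage.ImageDesc.Top (mem : Mem) (p : Nat) : Nat := rd mem (p + 4) 4

/-- `SavedImage`: the offset of `ImageDesc.Width` (`GifWord`, 4 bytes). -/
@[gfield] def Off.SavedImage.ImageDesc.Width : Nat := 8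
/-- The `GifWord` field `ImageDesc.Width` of the `SavedImage` at the address `p`, as a number. -/
@[gfield] def SavedImage.ImageDesc.Width (mem : Mem) (p : Nat) : Nat := rd mem (p + 8) 4

/-- `SavedImage`: the offset of `ImageDesc.Height` (`GifWord`, 4 bytes). -/
@[gfield] def Off.SavedImage.ImageDesc.Height : Nat := 12
/-- The `GifWord` field `ImageDesc.Height` of the `SavedImage` at the address `p`, as a number. -/
@[gfield] def SavedImage.ImageDesc.Height (mem : Mem) (p : Nat) : Nat := rd mem (p + 12) 4

/-- `SavedImage`: the offset of `ImageDesc.Interlace` (`_Bool`, 1 bytes). -/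
@[gfield] def Off.SavedImage.ImageDesc.Interlace : Nat := 16
/-- The `_Bool` field `ImageDesc.Interlace` of the `SavedImage` at the address `p`, as a number. -/
@[gfield] def SavedImage.ImageDesc.Interlace (mem : Mem) (p : Nat) : Nat := rd mem (p + 16) 1

/-- `SavedImage`: the offset of `ImageDesc.ColorMap` (`ColorMapObject *`, 8 bytes). -/
@[gfield] def Off.SavedImage.ImageDesc.ColorMap : Nat := 24
/-- The `ColorMapObject *` field `ImageDesc.ColorMap` of the `SavedImage` at the address `p`, as a number. -/
@[gfield] def SavedImage.ImageDesc.ColorMap (mem : Mem) (p : Nat) : Nat := rd mem (p + 24) 8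

/-- `SavedImage`: the offset of `RasterBits` (`GifByteType *`, 8 bytes). -/
@[gfield] def Off.SavedImage.RasterBits : Nat := 32
/-- The `GifByteType *` field `RasterBits` of the `SavedImage` at the address `p`, as a number. -/
@[gfield] def SavedImage.RasterBits (mem : Mem) (p : Nat) : Nat := rd mem (p + 32) 8

/-- `SavedImage`: the offset of `ExtensionBlockCount` (`int`, 4 bytes). -/
@[gfield] def Off.SavedImage.ExtensionBlockCount : Nat := 40
/-- The `int` field `ExtensionBlockCount` of the `SavedImage` at the address `p`, as a number. -/
@[gfield] def SavedImage.ExtensionBlockCount (mem : Mem) (p : Nat) : Nat := rd mem (p + 40) 4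

/-- `SavedImage`: the offset of `ExtensionBlocks` (`ExtensionBlock *`, 8 bytes). -/
@[gfield] def Off.SavedImage.ExtensionBlocks : Nat := 48
/-- The `ExtensionBlock *` field `ExtensionBlocks` of the `SavedImage` at the address `p`, as a number. -/
@[gfield] def SavedImage.ExtensionBlocks (mem : Mem) (p : Nat) : Nat := rd mem (p + 48) 8

/-! ### `GifFileType` (120 bytes) -/

/-- `sizeof(GifFileType)`. -/
@[gfield] def Off.sizeof.GifFileType : Nat := 120

/-- `GifFileType`: the offset of `SWidth` (`GifWord`, 4 bytes). -/
@[gfield] def Off.GifFileType.SWidth : Nat := 0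
/-- The `GifWord` field `SWidth` of the `GifFileType` at the address `p`, as a number. -/
@[gfield] def GifFileType.SWidth (mem : Mem) (p : Nat) : Nat := rd mem p 4

/-- `GifFileType`: the offset of `SHeight` (`GifWord`, 4 bytes). -/
@[gfield] def Off.GifFileType.SHeight : Nat := 4
/-- The `GifWord` field `SHeight` of the `GifFileType` at the address `p`, as a number. -/
@[gfield] def GifFileType.SHeight (mem : Mem) (p : Nat) : Nat := rd mem (p + 4) 4

/-- `GifFileType`: the offset of `SColorResolution` (`GifWord`, 4 bytes). -/
@[gfield] def Off.GifFileType.SColorResolution : Nat := 8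
/-- The `GifWord` field `SColorResolution` of the `GifFileType` at the address `p`, as a number. -/
@[gfield] def GifFileType.SColorResolution (mem : Mem) (p : Nat) : Nat := rd mem (p + 8) 4

/-- `GifFileType`: the offset of `SBackGroundColor` (`GifWord`, 4 bytes). -/
@[gfield] def Off.GifFileType.SBackGroundColor : Nat := 12
/-- The `GifWord` field `SBackGroundColor` of the `GifFileType` at the address `p`, as a number. -/
@[gfield] def GifFileType.SBackGroundColor (mem : Mem) (p : Nat) : Nat := rd mem (p + 12) 4

/-- `GifFileType`: the offset of `AspectByte` (`GifByteType`, 1 bytes). -/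
@[gfield] def Off.GifFileType.AspectByte : Nat := 16
/-- The `GifByteType` field `AspectByte` of the `GifFileType` at the address `p`, as a number. -/
@[gfield] def GifFileType.AspectByte (mem : Mem) (p : Nat) : Nat := rd mem (p + 16) 1

/-- `GifFileType`: the offset of `SColorMap` (`ColorMapObject *`, 8 bytes). -/
@[gfield] def Off.GifFileType.SColorMap : Nat := 24
/-- The `ColorMapObject *` field `SColorMap` of the `GifFileType` at the address `p`, as a number. -/
@[gfield] def GifFileType.SColorMap (mem : Mem) (p : Nat) : Nat := rd mem (p + 24) 8

/-- `GifFileType`: the offset of `ImageCount` (`int`, 4 bytes). -/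
@[gfield] def Off.GifFileType.ImageCount : Nat := 32
/-- The `int` field `ImageCount` of the `GifFileType` at the address `p`, as a number. -/
@[gfield] def GifFileType.ImageCount (mem : Mem) (p : Nat) : Nat := rd mem (p + 32) 4

/-- `GifFileType`: the offset of `Image` (`GifImageDesc`, 32 bytes). -/
@[gfield] def Off.GifFileType.Image : Nat := 40
/-- The address of the embedded `GifImageDesc` `Image` of the `GifFileType` at `p`. -/
@[gfield] def GifFileType.Image_at (p : Nat) : Nat := p + 40

/-- `GifFileType`: the offset of `Image.Left` (`GifWord`, 4 bytes). -/
@[gfield] def Off.GifFileType.Image.Left : Nat := 40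
/-- The `GifWord` field `Image.Left` of the `GifFileType` at the address `p`, as a number. -/
@[gfield] def GifFileType.Image.Left (mem : Mem) (p : Nat) : Nat := rd mem (p + 40) 4

/-- `GifFileType`: the offset of `Image.Top` (`GifWord`, 4 bytes). -/
@[gfield] def Off.GifFileType.Image.Top : Nat := 44
/-- The `GifWord` field `Image.Top` of the `GifFileType` at the address `p`, as a number. -/
@[gfield] def GifFileType.Image.Top (mem : Mem) (p : Nat) : Nat := rd mem (p + 44) 4

/-- `GifFileType`: the offset of `Image.Width` (`GifWord`, 4 bytes). -/
@[gfield] def Off.GifFileType.Image.Width : Nat := 48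
/-- The `GifWord` field `Image.Width` of the `GifFileType` at the address `p`, as a number. -/
@[gfield] def GifFileType.Image.Width (mem : Mem) (p : Nat) : Nat := rd mem (p + 48) 4

/-- `GifFileType`: the offset of `Image.Height` (`GifWord`, 4 bytes). -/
@[gfield] def Off.GifFileType.Image.Height : Nat := 52
/-- The `GifWord` field `Image.Height` of the `GifFileType` at the address `p`, as a number. -/
@[gfield] def GifFileType.Image.Height (mem : Mem) (p : Nat) : Nat := rd mem (p + 52) 4

/-- `GifFileType`: the offset of `Image.Interlace` (`_Bool`, 1 bytes). -/
@[gfield] def Off.GifFileType.Image.Interlace : Nat := 56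
/-- The `_Bool` field `Image.Interlace` of the `GifFileType` at the address `p`, as a number. -/
@[gfield] def GifFileType.Image.Interlace (mem : Mem) (p : Nat) : Nat := rd mem (p + 56) 1

/-- `GifFileType`: the offset of `Image.ColorMap` (`ColorMapObject *`, 8 bytes). -/
@[gfield] def Off.GifFileType.Image.ColorMap : Nat := 64
/-- The `ColorMapObject *` field `Image.ColorMap` of the `GifFileType` at the address `p`, as a number. -/
@[gfield] def GifFileType.Image.ColorMap (mem : Mem) (p : Nat) : Nat := rd mem (p + 64) 8

/-- `GifFileType`: the offset of `SavedImages` (`SavedImage *`, 8 bytes). -/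
@[gfield] def Off.GifFileType.SavedImages : Nat := 72
/-- The `SavedImage *` field `SavedImages` of the `GifFileType` at the address `p`, as a number. -/
@[gfield] def GifFileType.SavedImages (mem : Mem) (p : Nat) : Nat := rd mem (p + 72) 8

/-- `GifFileType`: the offset of `ExtensionBlockCount` (`int`, 4 bytes). -/
@[gfield] def Off.GifFileType.ExtensionBlockCount : Nat := 80
/-- The `int` field `ExtensionBlockCount` of the `GifFileType` at the address `p`, as a number. -/
@[gfield] def GifFileType.ExtensionBlockCount (mem : Mem) (p : Nat) : Nat := rd mem (p + 80) 4

/-- `GifFileType`: the offset of `ExtensionBlocks` (`ExtensionBlock *`, 8 bytes). -/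
@[gfield] def Off.GifFileType.ExtensionBlocks : Nat := 88
/-- The `ExtensionBlock *` field `ExtensionBlocks` of the `GifFileType` at the address `p`, as a number. -/
@[gfield] def GifFileType.ExtensionBlocks (mem : Mem) (p : Nat) : Nat := rd mem (p + 88) 8

/-- `GifFileType`: the offset of `Error` (`int`, 4 bytes). -/
@[gfield] def Off.GifFileType.Error : Nat := 96
/-- The `int` field `Error` of the `GifFileType` at the address `p`, as a number. -/
@[gfield] def GifFileType.Error (mem : Mem) (p : Nat) : Nat := rd mem (p + 96) 4

/-- `GifFileType`: the offset of `UserData` (`void *`, 8 bytes). -/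
@[gfield] def Off.GifFileType.UserData : Nat := 104
/-- The `void *` field `UserData` of the `GifFileType` at the address `p`, as a number. -/
@[gfield] def GifFileType.UserData (mem : Mem) (p : Nat) : Nat := rd mem (p + 104) 8

/-- `GifFileType`: the offset of `Private` (`void *`, 8 bytes). -/
@[gfield] def Off.GifFileType.Private : Nat := 112
/-- The `void *` field `Private` of the `GifFileType` at the address `p`, as a number. -/
@[gfield] def GifFileType.Private (mem : Mem) (p : Nat) : Nat := rd mem (p + 112) 8

/-! ### `GifFilePrivateType` (24936 bytes) -/

/-- `sizeof(GifFilePrivateType)`. -/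
@[gfield] def Off.sizeof.GifFilePrivateType : Nat := 24936

/-- `GifFilePrivateType`: the offset of `FileState` (`GifWord`, 4 bytes). -/
@[gfield] def Off.GifFilePrivateType.FileState : Nat := 0
/-- The `GifWord` field `FileState` of the `GifFilePrivateType` at the address `p`, as a number. -/
@[gfield] def GifFilePrivateType.FileState (mem : Mem) (p : Nat) : Nat := rd mem p 4

/-- `GifFilePrivateType`: the offset of `FileHandle` (`GifWord`, 4 bytes). -/
@[gfield] def Off.GifFilePrivateType.FileHandle : Nat := 4
/-- The `GifWord` field `FileHandle` of the `GifFilePrivateType` at the address `p`, as a number. -/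
@[gfield] def GifFilePrivateType.FileHandle (mem : Mem) (p : Nat) : Nat := rd mem (p + 4) 4

/-- `GifFilePrivateType`: the offset of `BitsPerPixel` (`GifWord`, 4 bytes). -/
@[gfield] def Off.GifFilePrivateType.BitsPerPixel : Nat := 8
/-- The `GifWord` field `BitsPerPixel` of the `GifFilePrivateType` at the address `p`, as a number. -/
@[gfield] def GifFilePrivateType.BitsPerPixel (mem : Mem) (p : Nat) : Nat := rd mem (p + 8) 4

/-- `GifFilePrivateType`: the offset of `ClearCode` (`GifWord`, 4 bytes). -/
@[gfield] def Off.GifFilePrivateType.ClearCode : Nat := 12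
/-- The `GifWord` field `ClearCode` of the `GifFilePrivateType` at the address `p`, as a number. -/
@[gfield] def GifFilePrivateType.ClearCode (mem : Mem) (p : Nat) : Nat := rd mem (p + 12) 4

/-- `GifFilePrivateType`: the offset of `EOFCode` (`GifWord`, 4 bytes). -/
@[gfield] def Off.GifFilePrivateType.EOFCode : Nat := 16
/-- The `GifWord` field `EOFCode` of the `GifFilePrivateType` at the address `p`, as a number. -/
@[gfield] def GifFilePrivateType.EOFCode (mem : Mem) (p : Nat) : Nat := rd mem (p + 16) 4

/-- `GifFilePrivateType`: the offset of `RunningCode` (`GifWord`, 4 bytes). -/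
@[gfield] def Off.GifFilePrivateType.RunningCode : Nat := 20
/-- The `GifWord` field `RunningCode` of the `GifFilePrivateType` at the address `p`, as a number. -/
@[gfield] def GifFilePrivateType.RunningCode (mem : Mem) (p : Nat) : Nat := rd mem (p + 20) 4

/-- `GifFilePrivateType`: the offset of `RunningBits` (`GifWord`, 4 bytes). -/
@[gfield] def Off.GifFilePrivateType.RunningBits : Nat := 24
/-- The `GifWord` field `RunningBits` of the `GifFilePrivateType` at the address `p`, as a number. -/
@[gfield] def GifFilePrivateType.RunningBits (mem : Mem) (p : Nat) : Nat := rd mem (p + 24) 4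

/-- `GifFilePrivateType`: the offset of `MaxCode1` (`GifWord`, 4 bytes). -/
@[gfield] def Off.GifFilePrivateType.MaxCode1 : Nat := 28
/-- The `GifWord` field `MaxCode1` of the `GifFilePrivateType` at the address `p`, as a number. -/
@[gfield] def GifFilePrivateType.MaxCode1 (mem : Mem) (p : Nat) : Nat := rd mem (p + 28) 4

/-- `GifFilePrivateType`: the offset of `LastCode` (`GifWord`, 4 bytes). -/
@[gfield] def Off.GifFilePrivateType.LastCode : Nat := 32
/-- The `GifWord` field `LastCode` of the `GifFilePrivateType` at the address `p`, as a number. -/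
@[gfield] def GifFilePrivateType.LastCode (mem : Mem) (p : Nat) : Nat := rd mem (p + 32) 4

/-- `GifFilePrivateType`: the offset of `CrntCode` (`GifWord`, 4 bytes). -/
@[gfield] def Off.GifFilePrivateType.CrntCode : Nat := 36
/-- The `GifWord` field `CrntCode` of the `GifFilePrivateType` at the address `p`, as a number. -/
@[gfield] def GifFilePrivateType.CrntCode (mem : Mem) (p : Nat) : Nat := rd mem (p + 36) 4

/-- `GifFilePrivateType`: the offset of `StackPtr` (`GifWord`, 4 bytes). -/
@[gfield] def Off.GifFilePrivateType.StackPtr : Nat := 40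
/-- The `GifWord` field `StackPtr` of the `GifFilePrivateType` at the address `p`, as a number. -/
@[gfield] def GifFilePrivateType.StackPtr (mem : Mem) (p : Nat) : Nat := rd mem (p + 40) 4

/-- `GifFilePrivateType`: the offset of `CrntShiftState` (`GifWord`, 4 bytes). -/
@[gfield] def Off.GifFilePrivateType.CrntShiftState : Nat := 44
/-- The `GifWord` field `CrntShiftState` of the `GifFilePrivateType` at the address `p`, as a number. -/
@[gfield] def GifFilePrivateType.CrntShiftState (mem : Mem) (p : Nat) : Nat := rd mem (p + 44) 4

/-- `GifFilePrivateType`: the offset of `CrntShiftDWord` (`long unsigned int`, 8 bytes). -/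
@[gfield] def Off.GifFilePrivateType.CrntShiftDWord : Nat := 48
/-- The `long unsigned int` field `CrntShiftDWord` of the `GifFilePrivateType` at the address `p`, as a number. -/
@[gfield] def GifFilePrivateType.CrntShiftDWord (mem : Mem) (p : Nat) : Nat := rd mem (p + 48) 8

/-- `GifFilePrivateType`: the offset of `PixelCount` (`long unsigned int`, 8 bytes). -/
@[gfield] def Off.GifFilePrivateType.PixelCount : Nat := 56
/-- The `long unsigned int` field `PixelCount` of the `GifFilePrivateType` at the address `p`, as a number. -/
@[gfield] def GifFilePrivateType.PixelCount (mem : Mem) (p : Nat) : Nat := rd mem (p + 56) 8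

/-- `GifFilePrivateType`: the offset of `File` (`FILE *`, 8 bytes). -/
@[gfield] def Off.GifFilePrivateType.File : Nat := 64
/-- The `FILE *` field `File` of the `GifFilePrivateType` at the address `p`, as a number. -/
@[gfield] def GifFilePrivateType.File (mem : Mem) (p : Nat) : Nat := rd mem (p + 64) 8

/-- `GifFilePrivateType`: the offset of `Read` (`InputFunc`, 8 bytes). -/
@[gfield] def Off.GifFilePrivateType.Read : Nat := 72
/-- The `InputFunc` field `Read` of the `GifFilePrivateType` at the address `p`, as a number. -/
@[gfield] def GifFilePrivateType.Read (mem : Mem) (p : Nat) : Nat := rd mem (p + 72) 8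

/-- `GifFilePrivateType`: the offset of `Write` (`OutputFunc`, 8 bytes). -/
@[gfield] def Off.GifFilePrivateType.Write : Nat := 80
/-- The `OutputFunc` field `Write` of the `GifFilePrivateType` at the address `p`, as a number. -/
@[gfield] def GifFilePrivateType.Write (mem : Mem) (p : Nat) : Nat := rd mem (p + 80) 8

/-- `GifFilePrivateType`: the offset of `Buf` (`GifByteType`, 256 bytes). -/
@[gfield] def Off.GifFilePrivateType.Buf : Nat := 88
@[gfield] def Off.GifFilePrivateType.Buf.count : Nat := 256
@[gfield] def Off.GifFilePrivateType.Buf.elem : Nat := 1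
/-- The address of element `i` of `Buf` of the `GifFilePrivateType` at `p`. -/
@[gfield] def GifFilePrivateType.Buf_at (p i : Nat) : Nat := p + 88 + i

/-- `GifFilePrivateType`: the offset of `Stack` (`GifByteType`, 4095 bytes). -/
@[gfield] def Off.GifFilePrivateType.Stack : Nat := 344
@[gfield] def Off.GifFilePrivateType.Stack.count : Nat := 4095
@[gfield] def Off.GifFilePrivateType.Stack.elem : Nat := 1
/-- The address of element `i` of `Stack` of the `GifFilePrivateType` at `p`. -/
@[gfield] def GifFilePrivateType.Stack_at (p i : Nat) : Nat := p + 344 + i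

/-- `GifFilePrivateType`: the offset of `Suffix` (`GifByteType`, 4096 bytes). -/
@[gfield] def Off.GifFilePrivateType.Suffix : Nat := 4439
@[gfield] def Off.GifFilePrivateType.Suffix.count : Nat := 4096
@[gfield] def Off.GifFilePrivateType.Suffix.elem : Nat := 1
/-- The address of element `i` of `Suffix` of the `GifFilePrivateType` at `p`. -/
@[gfield] def GifFilePrivateType.Suffix_at (p i : Nat) : Nat := p + 4439 + i

/-- `GifFilePrivateType`: the offset of `Prefix` (`GifPrefixType`, 16384 bytes). -/
@[gfield] def Off.GifFilePrivateType.Prefix : Nat := 8536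
@[gfield] def Off.GifFilePrivateType.Prefix.count : Nat := 4096
@[gfield] def Off.GifFilePrivateType.Prefix.elem : Nat := 4
/-- The address of element `i` of `Prefix` of the `GifFilePrivateType` at `p`. -/
@[gfield] def GifFilePrivateType.Prefix_at (p i : Nat) : Nat := p + 8536 + 4 * i

/-- `GifFilePrivateType`: the offset of `HashTable` (`GifHashTableType *`, 8 bytes). -/
@[gfield] def Off.GifFilePrivateType.HashTable : Nat := 24920
/-- The `GifHashTableType *` field `HashTable` of the `GifFilePrivateType` at the address `p`, as a number. -/
@[gfield] def GifFilePrivateType.HashTable (mem : Mem) (p : Nat) : Nat := rd mem (p + 24920) 8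

/-- `GifFilePrivateType`: the offset of `gif89` (`_Bool`, 1 bytes). -/
@[gfield] def Off.GifFilePrivateType.gif89 : Nat := 24928
/-- The `_Bool` field `gif89` of the `GifFilePrivateType` at the address `p`, as a number. -/
@[gfield] def GifFilePrivateType.gif89 (mem : Mem) (p : Nat) : Nat := rd mem (p + 24928) 1

/-! ### `mem_cursor` (16 bytes) -/

/-- `sizeof(mem_cursor)`. -/
@[gfield] def Off.sizeof.mem_cursor : Nat := 16

/-- `mem_cursor`: the offset of `cur` (`const unsigned char *`, 8 bytes). -/
@[gfield] def Off.mem_cursor.cur : Nat := 0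
/-- The `const unsigned char *` field `cur` of the `mem_cursor` at the address `p`, as a number. -/
@[gfield] def mem_cursor.cur (mem : Mem) (p : Nat) : Nat := rd mem p 8

/-- `mem_cursor`: the offset of `end` (`const unsigned char *`, 8 bytes). -/
@[gfield] def Off.mem_cursor.end : Nat := 8
/-- The `const unsigned char *` field `end` of the `mem_cursor` at the address `p`, as a number. -/
@[gfield] def mem_cursor.end (mem : Mem) (p : Nat) : Nat := rd mem (p + 8) 8

/-! ### `gif_report` (64 bytes) -/

/-- `sizeof(gif_report)`. -/
@[gfield] def Off.sizeof.gif_report : Nat := 64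

/-- `gif_report`: the offset of `exit_code` (`int`, 4 bytes). -/
@[gfield] def Off.gif_report.exit_code : Nat := 0
/-- The `int` field `exit_code` of the `gif_report` at the address `p`, as a number. -/
@[gfield] def gif_report.exit_code (mem : Mem) (p : Nat) : Nat := rd mem p 4

/-- `gif_report`: the offset of `open_error` (`int`, 4 bytes). -/
@[gfield] def Off.gif_report.open_error : Nat := 4
/-- The `int` field `open_error` of the `gif_report` at the address `p`, as a number. -/
@[gfield] def gif_report.open_error (mem : Mem) (p : Nat) : Nat := rd mem (p + 4) 4

/-- `gif_report`: the offset of `slurp_result` (`int`, 4 bytes). -/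
@[gfield] def Off.gif_report.slurp_result : Nat := 8
/-- The `int` field `slurp_result` of the `gif_report` at the address `p`, as a number. -/
@[gfield] def gif_report.slurp_result (mem : Mem) (p : Nat) : Nat := rd mem (p + 8) 4

/-- `gif_report`: the offset of `gif_error` (`int`, 4 bytes). -/
@[gfield] def Off.gif_report.gif_error : Nat := 12
/-- The `int` field `gif_error` of the `gif_report` at the address `p`, as a number. -/
@[gfield] def gif_report.gif_error (mem : Mem) (p : Nat) : Nat := rd mem (p + 12) 4

/-- `gif_report`: the offset of `close_result` (`int`, 4 bytes). -/
@[gfield] def Off.gif_report.close_result : Nat := 16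
/-- The `int` field `close_result` of the `gif_report` at the address `p`, as a number. -/
@[gfield] def gif_report.close_result (mem : Mem) (p : Nat) : Nat := rd mem (p + 16) 4

/-- `gif_report`: the offset of `close_error` (`int`, 4 bytes). -/
@[gfield] def Off.gif_report.close_error : Nat := 20
/-- The `int` field `close_error` of the `gif_report` at the address `p`, as a number. -/
@[gfield] def gif_report.close_error (mem : Mem) (p : Nat) : Nat := rd mem (p + 20) 4

/-- `gif_report`: the offset of `image_count` (`int`, 4 bytes). -/
@[gfield] def Off.gif_report.image_count : Nat := 24
/-- The `int` field `image_count` of the `gif_report` at the address `p`, as a number. -/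
@[gfield] def gif_report.image_count (mem : Mem) (p : Nat) : Nat := rd mem (p + 24) 4

/-- `gif_report`: the offset of `screen_width` (`int`, 4 bytes). -/
@[gfield] def Off.gif_report.screen_width : Nat := 28
/-- The `int` field `screen_width` of the `gif_report` at the address `p`, as a number. -/
@[gfield] def gif_report.screen_width (mem : Mem) (p : Nat) : Nat := rd mem (p + 28) 4

/-- `gif_report`: the offset of `screen_height` (`int`, 4 bytes). -/
@[gfield] def Off.gif_report.screen_height : Nat := 32
/-- The `int` field `screen_height` of the `gif_report` at the address `p`, as a number. -/
@[gfield] def gif_report.screen_height (mem : Mem) (p : Nat) : Nat := rd mem (p + 32) 4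

/-- `gif_report`: the offset of `reserved` (`int`, 4 bytes). -/
@[gfield] def Off.gif_report.reserved : Nat := 36
/-- The `int` field `reserved` of the `gif_report` at the address `p`, as a number. -/
@[gfield] def gif_report.reserved (mem : Mem) (p : Nat) : Nat := rd mem (p + 36) 4

/-- `gif_report`: the offset of `pixels` (`long unsigned int`, 8 bytes). -/
@[gfield] def Off.gif_report.pixels : Nat := 40
/-- The `long unsigned int` field `pixels` of the `gif_report` at the address `p`, as a number. -/
@[gfield] def gif_report.pixels (mem : Mem) (p : Nat) : Nat := rd mem (p + 40) 8

/-- `gif_report`: the offset of `consumed` (`long unsigned int`, 8 bytes). -/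
@[gfield] def Off.gif_report.consumed : Nat := 48
/-- The `long unsigned int` field `consumed` of the `gif_report` at the address `p`, as a number. -/
@[gfield] def gif_report.consumed (mem : Mem) (p : Nat) : Nat := rd mem (p + 48) 8

/-- `gif_report`: the offset of `digest` (`long unsigned int`, 8 bytes). -/
@[gfield] def Off.gif_report.digest : Nat := 56
/-- The `long unsigned int` field `digest` of the `gif_report` at the address `p`, as a number. -/
@[gfield] def gif_report.digest (mem : Mem) (p : Nat) : Nat := rd mem (p + 56) 8

end Gif.Spec
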